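-- pv_equiv track=rewrite | github.com/maxim371/cs-module-project-hash-tables | applications/expensive_seq/expensive_seq.py | expensive_seq
-- ===== SOURCE A (Python) =====
-- cache = {}
--
-- def expensive_seq(x, y, z):
--     # Your code here
--     if x <= 0:
--         return y + z
--
--     if x > 0:
--         x_cache, y_cache, z_cache = 0,0,0
--         if (x-1, y+1,z*1) not in cache:
--             cache[(x-1,y+1,z*1)] = expensive_seq(x-1,y+1,z*1)
--
--         if (x-2,y+2,z*2) not in cache:
--             cache[(x-2,y+2,z*2)] = expensive_seq(x-2,y+2,z*2)
--
--         if (x-3,y+3,z*3) not in cache: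
--             cache[(x-3,y+3,z*3)] = expensive_seq(x-3,y+3,z*3)
--
--         return cache[(x-1,y+1,z*1)] + cache[(x-2,y+2,z*2)] + cache[(x-3,y+3,z*3)]
-- ===== SOURCE B (Python) =====
-- def expensive_seq(x, y, z):
--     # f(x, y, z) is linear in y and z: f(x, y, z) = a(x)*y + b(x) + c(x)*z,
--     # with coefficients depending on x only; compute them with a bottom-up loop.
--     if x <= 0:
--         return y + z
--     a1 = a2 = a3 = 1
--     b1 = b2 = b3 = 0
--     c1 = c2 = c3 = 1
--     for _ in range(x):
--         a = a1 + a2 + a3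
--         b = b1 + b2 + b3 + a1 + 2 * a2 + 3 * a3
--         c = c1 + 2 * c2 + 3 * c3
--         a1, a2, a3 = a, a1, a2
--         b1, b2, b3 = b, b1, b2
--         c1, c2, c3 = c, c1, c2
--     return a1 * y + b1 + c1 * z
-- ===== Notes on version B (the rewrite author's own statement) =====
-- stated objective: faster
-- what changed: A memoizes the 3-branch recursion in a global dict keyed by (x,y,z) (nearly useless when z≠0, since z is multiplied differently along each path); B exploits that the result is linear in y and z and computes the three coefficient sequences with one bottom-up loop over x, no cache and no recursion.
import Mathlib
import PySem

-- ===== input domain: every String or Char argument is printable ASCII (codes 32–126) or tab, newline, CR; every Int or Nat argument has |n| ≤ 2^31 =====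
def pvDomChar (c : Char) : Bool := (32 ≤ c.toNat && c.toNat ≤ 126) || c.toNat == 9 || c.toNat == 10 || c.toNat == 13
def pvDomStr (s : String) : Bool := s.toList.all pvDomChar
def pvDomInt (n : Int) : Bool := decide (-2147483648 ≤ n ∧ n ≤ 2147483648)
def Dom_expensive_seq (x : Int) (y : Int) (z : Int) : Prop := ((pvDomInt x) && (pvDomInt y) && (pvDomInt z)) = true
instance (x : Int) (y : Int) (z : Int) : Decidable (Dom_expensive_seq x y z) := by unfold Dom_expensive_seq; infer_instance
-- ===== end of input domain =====

-- B replaces the memoized (x,y,z)-keyed recursion by a linear-in-(y,z) coefficient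
-- recurrence computed with one bottom-up loop over x (no cache, no recursion).
-- Equivalence is about the RETURN value only: Python A also fills the module-level
-- `cache` dict as a side effect, which B does not reproduce.

-- ===== PORT A =====
-- the global `cache` dict is threaded through the recursion as explicit state;
-- a fresh call starts from the empty cache. The dict is Std.HashMap — same
-- contains/insert/lookup operations as Python's dict (insertion order never
-- observed here: the cache is only read back by key), chosen so the port
-- evaluates at dict sizes a Python dict also handles.
def goA (x y z : Int) (c : Std.HashMap (Int × Int × Int) Int) :
    Int × Std.HashMap (Int × Int × Int) Int :=
  if x ≤ 0 then (y + z, c)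
  else
    -- if (x-1, y+1, z*1) not in cache: cache[...] = expensive_seq(x-1, y+1, z*1)
    let c1 := if c.contains (x-1, y+1, z*1) then c else
      let r := goA (x-1) (y+1) (z*1) c
      r.2.insert (x-1, y+1, z*1) r.1
    let c2 := if c1.contains (x-2, y+2, z*2) then c1 else
      let r := goA (x-2) (y+2) (z*2) c1
      r.2.insert (x-2, y+2, z*2) r.1
    let c3 := if c2.contains (x-3, y+3, z*3) then c2 else
      let r := goA (x-3) (y+3) (z*3) c2
      r.2.insert (x-3, y+3, z*3) r.1
    -- cache lookups; the keys are always present here, so getD _ 0 is exact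
    (c3.getD (x-1, y+1, z*1) 0 + c3.getD (x-2, y+2, z*2) 0 + c3.getD (x-3, y+3, z*3) 0, c3)
termination_by x.toNat
decreasing_by all_goals omega

def expensive_seq (x : Int) (y : Int) (z : Int) : Int :=
  (goA x y z Std.HashMap.emptyWithCapacity).1

-- ===== PORT B =====
-- state: ((a1,a2,a3),(b1,b2,b3),(c1,c2,c3)) — the nine scalars of Source B's loop
def stepB (s : (Int × Int × Int) × (Int × Int × Int) × (Int × Int × Int)) :
    (Int × Int × Int) × (Int × Int × Int) × (Int × Int × Int) :=
  ((s.1.1 + s.1.2.1 + s.1.2.2, s.1.1, s.1.2.1),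
   (s.2.1.1 + s.2.1.2.1 + s.2.1.2.2 + s.1.1 + 2 * s.1.2.1 + 3 * s.1.2.2, s.2.1.1, s.2.1.2.1),
   (s.2.2.1 + 2 * s.2.2.2.1 + 3 * s.2.2.2.2, s.2.2.1, s.2.2.2.1))

def loopB : Nat → ((Int × Int × Int) × (Int × Int × Int) × (Int × Int × Int)) →
    (Int × Int × Int) × (Int × Int × Int) × (Int × Int × Int)
  | 0, s => s
  | n + 1, s => loopB n (stepB s)

def expensive_seq_alt (x : Int) (y : Int) (z : Int) : Int :=
  if x ≤ 0 then y + z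
  else
    let s := loopB x.toNat ((1, 1, 1), (0, 0, 0), (1, 1, 1))
    s.1.1 * y + s.2.1.1 + s.2.2.1 * z

-- ===== PRECONDITION & SPEC =====
-- Pre_ excludes only x > 900: A's recursion depth is x, so for large x the call
-- exhausts CPython's stack and raises (RecursionError, or SystemError under a
-- harness; cold-start boundary measured near x ≈ 998 under the default limit of
-- 1000, lower with whatever frames the caller already occupies).
def Pre_expensive_seq (x : Int) (y : Int) (z : Int) : Prop := x ≤ 900
instance (x : Int) (y : Int) (z : Int) : Decidable (Pre_expensive_seq x y z) := by
  unfold Pre_expensive_seq; infer_instance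

def pvWitness_expensive_seq : Int × Int × Int := (5, 2, 3)

def Spec_expensive_seq (x : Int) (y : Int) (z : Int) (out : Int) : Prop := out = expensive_seq_alt x y z
instance (x : Int) (y : Int) (z : Int) (out : Int) : Decidable (Spec_expensive_seq x y z out) := by unfold Spec_expensive_seq; infer_instance

-- ===== CLAIM (what is proved, stated in full; the proofs are below) =====
def Claim_equal_expensive_seq : Prop := ∀ (x : Int) (y : Int) (z : Int), Dom_expensive_seq x y z → Pre_expensive_seq x y z → Spec_expensive_seq x y z (expensive_seq x y z)


-- ===== LEMMAS AND PROOFS =====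

-- the mathematical sequence both programs compute, on the Nat shadow of x
def gSeq : Nat → Int → Int → Int
  | 0, y, z => y + z
  | n + 1, y, z => gSeq n (y+1) (z*1) + gSeq (n-1) (y+2) (z*2) + gSeq (n-2) (y+3) (z*3)
decreasing_by all_goals omega

-- every value stored in the cache is the true value of the sequence at its key
def CacheOK (c : Std.HashMap (Int × Int × Int) Int) : Prop :=
  ∀ (k : Int × Int × Int) (v : Int), getElem? c k = some v → v = gSeq k.1.toNat k.2.1 k.2.2

-- one `if key not in cache: cache[key] = expensive_seq(key)` block, given the
-- recursive call's correctness: the cache stays OK, loses no key, and gains the key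
theorem block_ok (x' y' z' : Int) (c : Std.HashMap (Int × Int × Int) Int)
    (hc : CacheOK c)
    (hrec : (goA x' y' z' c).1 = gSeq x'.toNat y' z' ∧ CacheOK (goA x' y' z' c).2 ∧
      (∀ k, c.contains k = true → (goA x' y' z' c).2.contains k = true)) :
    CacheOK (if c.contains (x', y', z') then c
      else (goA x' y' z' c).2.insert (x', y', z') (goA x' y' z' c).1) ∧
    (∀ k, c.contains k = true → (if c.contains (x', y', z') then c
      else (goA x' y' z' c).2.insert (x', y', z') (goA x' y' z' c).1).contains k = true) ∧
    (if c.contains (x', y', z') then c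
      else (goA x' y' z' c).2.insert (x', y', z') (goA x' y' z' c).1).contains (x', y', z') = true := by
  obtain ⟨hv, hok, hmono⟩ := hrec
  by_cases h : c.contains (x', y', z') = true
  · simp only [if_pos h]
    exact ⟨hc, fun k hk => hk, h⟩
  · simp only [if_neg h]
    refine ⟨?_, ?_, ?_⟩
    · intro k v hkv
      rw [Std.HashMap.getElem?_insert] at hkv
      split at hkv
      · rename_i hk
        have hk' : (x', y', z') = k := by simpa using hk
        subst hk'
        simp only [Option.some.injEq] at hkv
        subst hkv
        simpa using hv
      · exact hok k v hkv
    · intro k hk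
      rw [Std.HashMap.contains_insert]
      simp [hmono k hk]
    · simp [Std.HashMap.contains_insert]

-- retrieve a cached key's value through CacheOK
theorem getD_of_ok (c : Std.HashMap (Int × Int × Int) Int) (hc : CacheOK c)
    (k : Int × Int × Int) (h : c.contains k = true) :
    c.getD k 0 = gSeq k.1.toNat k.2.1 k.2.2 := by
  rw [← Std.HashMap.isSome_getElem?_eq_contains] at h
  obtain ⟨v, hv⟩ := Option.isSome_iff_exists.mp h
  rw [Std.HashMap.getD_eq_getD_getElem?, hv]
  exact hc k v hv

theorem goA_ok : ∀ (n : Nat) (x y z : Int) (c : Std.HashMap (Int × Int × Int) Int),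
    x.toNat ≤ n → CacheOK c →
    (goA x y z c).1 = gSeq x.toNat y z ∧ CacheOK (goA x y z c).2 ∧
      (∀ k, c.contains k = true → (goA x y z c).2.contains k = true) := by
  intro n
  induction n with
  | zero =>
    intro x y z c hn hc
    have hx : x ≤ 0 := by omega
    rw [goA]
    simp only [if_pos hx]
    refine ⟨?_, hc, fun k hk => hk⟩
    rw [show x.toNat = 0 by omega]
    simp [gSeq]
  | succ m ih =>
    intro x y z c hn hc
    by_cases hx : x ≤ 0
    · rw [goA]
      simp only [if_pos hx]
      refine ⟨?_, hc, fun k hk => hk⟩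
      rw [show x.toNat = 0 by omega]
      simp [gSeq]
    · rw [goA]
      simp only [if_neg hx]
      have H1 := block_ok (x-1) (y+1) (z*1) c hc
        (ih (x-1) (y+1) (z*1) c (by omega) hc)
      set c1 := if c.contains (x-1, y+1, z*1) then c
        else (goA (x-1) (y+1) (z*1) c).2.insert (x-1, y+1, z*1) (goA (x-1) (y+1) (z*1) c).1 with hc1def
      obtain ⟨hok1, hmono1, hin1⟩ := H1
      have H2 := block_ok (x-2) (y+2) (z*2) c1 hok1
        (ih (x-2) (y+2) (z*2) c1 (by omega) hok1)
      set c2 := if c1.contains (x-2, y+2, z*2) then c1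
        else (goA (x-2) (y+2) (z*2) c1).2.insert (x-2, y+2, z*2) (goA (x-2) (y+2) (z*2) c1).1 with hc2def
      obtain ⟨hok2, hmono2, hin2⟩ := H2
      have H3 := block_ok (x-3) (y+3) (z*3) c2 hok2
        (ih (x-3) (y+3) (z*3) c2 (by omega) hok2)
      set c3 := if c2.contains (x-3, y+3, z*3) then c2
        else (goA (x-3) (y+3) (z*3) c2).2.insert (x-3, y+3, z*3) (goA (x-3) (y+3) (z*3) c2).1 with hc3def
      obtain ⟨hok3, hmono3, hin3⟩ := H3
      have k1in : c3.contains (x-1, y+1, z*1) = true := hmono3 _ (hmono2 _ hin1)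
      have k2in : c3.contains (x-2, y+2, z*2) = true := hmono3 _ hin2
      refine ⟨?_, hok3, fun k hk => hmono3 k (hmono2 k (hmono1 k hk))⟩
      show c3.getD (x-1, y+1, z*1) 0 + c3.getD (x-2, y+2, z*2) 0 + c3.getD (x-3, y+3, z*3) 0
        = gSeq x.toNat y z
      rw [getD_of_ok c3 hok3 _ k1in, getD_of_ok c3 hok3 _ k2in, getD_of_ok c3 hok3 _ hin3]
      rw [show x.toNat = (x.toNat - 1) + 1 by omega, gSeq]
      rw [show ((x:Int)-1).toNat = x.toNat - 1 by omega,
          show ((x:Int)-2).toNat = x.toNat - 1 - 1 by omega,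
          show ((x:Int)-3).toNat = x.toNat - 1 - 2 by omega]

theorem expensive_seq_eq_gSeq (x y z : Int) : expensive_seq x y z = gSeq x.toNat y z := by
  have h := goA_ok x.toNat x y z Std.HashMap.emptyWithCapacity le_rfl
    (by intro k v hv; simp at hv)
  exact h.1

theorem loopB_succ' (n : Nat) (s : (Int × Int × Int) × (Int × Int × Int) × (Int × Int × Int)) :
    loopB (n + 1) s = stepB (loopB n s) := by
  induction n generalizing s with
  | zero => rfl
  | succ m ih => show loopB (m+1) (stepB s) = _ ; rw [ih (stepB s)] ; rfl

theorem loopB_ok : ∀ (n : Nat),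
    (∀ y z : Int, (loopB n ((1,1,1),(0,0,0),(1,1,1))).1.1 * y +
      (loopB n ((1,1,1),(0,0,0),(1,1,1))).2.1.1 +
      (loopB n ((1,1,1),(0,0,0),(1,1,1))).2.2.1 * z = gSeq n y z) ∧
    (∀ y z : Int, (loopB n ((1,1,1),(0,0,0),(1,1,1))).1.2.1 * y +
      (loopB n ((1,1,1),(0,0,0),(1,1,1))).2.1.2.1 +
      (loopB n ((1,1,1),(0,0,0),(1,1,1))).2.2.2.1 * z = gSeq (n-1) y z) ∧
    (∀ y z : Int, (loopB n ((1,1,1),(0,0,0),(1,1,1))).1.2.2 * y +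
      (loopB n ((1,1,1),(0,0,0),(1,1,1))).2.1.2.2 +
      (loopB n ((1,1,1),(0,0,0),(1,1,1))).2.2.2.2 * z = gSeq (n-2) y z) := by
  intro n
  induction n with
  | zero =>
    refine ⟨?_, ?_, ?_⟩ <;> intro y z <;> simp [loopB, gSeq]
  | succ m ih =>
    rw [loopB_succ']
    obtain ⟨h1, h2, h3⟩ := ih
    refine ⟨?_, ?_, ?_⟩ <;> intro y z
    · rw [gSeq, ← h1 (y+1) (z*1), ← h2 (y+2) (z*2), ← h3 (y+3) (z*3)]
      simp only [stepB]
      ring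
    · simp only [stepB, Nat.add_sub_cancel]
      exact h1 y z
    · simp only [stepB]
      have : m + 1 - 2 = m - 1 := by omega
      rw [this]
      exact h2 y z

theorem expensive_seq_alt_eq_gSeq (x y z : Int) : expensive_seq_alt x y z = gSeq x.toNat y z := by
  unfold expensive_seq_alt
  by_cases hx : x ≤ 0
  · have : x.toNat = 0 := by omega
    simp [hx, this, gSeq]
  · simp only [if_neg hx]
    exact (loopB_ok x.toNat).1 y z

-- ===== VERDICT (by name: the statement is the Claim_ definition above) =====
theorem expensive_seq_spec : Claim_equal_expensive_seq := by
  intro x y z _ _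
  unfold Spec_expensive_seq
  rw [expensive_seq_eq_gSeq, expensive_seq_alt_eq_gSeq]
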